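-- pv_equiv track=rewrite | github.com/fspv/learning | l33tcode/range-sum-query-2d-mutable.py | build_range_sum
-- ===== SOURCE A (Python) =====
-- from typing import List
--
-- def next_power_of_two(num: int) -> int:
--     if num == 0:
--         return 0
--
--     power = 1
--
--     while num > power:
--         power *= 2
--
--     return power
--
-- def build_range_sum_col(array: List[int]) -> List[int]:
--     length = next_power_of_two(len(array))
--     result = [0 for _ in range(2 * length - 1)]
--
--     for pos in range(length - 1, length * 2 - 1):
--         if pos < length - 1 + len(array):
--             result[pos] = array[pos - (length - 1)]
--         else:
--             result[pos] = 0
--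
--     for pos in reversed(range(length - 1)):
--         result[pos] = result[2 * pos + 1] + result[2 * pos + 2]
--
--     return result
--
-- def build_range_sum(matrix: List[List[int]]) -> List[List[int]]:
--     length = next_power_of_two(len(matrix))
--     result = [[0] for _ in range(2 * length - 1)]
--
--     for pos in range(length - 1, length * 2 - 1):
--         if pos < length - 1 + len(matrix):
--             result[pos] = build_range_sum_col(matrix[pos - (length - 1)])
--         else:
--             result[pos] = build_range_sum_col([0] * len(matrix[0]))
--
--     for pos in reversed(range(length - 1)):
--         result[pos] = list(map(sum, zip(result[2 * pos + 1], result[2 * pos + 2])))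
--
--     return result
-- ===== SOURCE B (Python) =====
-- from typing import List
--
-- def build_range_sum(matrix: List[List[int]]) -> List[List[int]]:
--     def npow2(n: int) -> int:
--         return 0 if n == 0 else 1 << (n - 1).bit_length()
--
--     def up(comb, row):
--         return [comb(row[2 * i], row[2 * i + 1]) for i in range(len(row) // 2)]
--
--     def levels(comb, row):
--         if len(row) <= 1:
--             return row
--         return levels(comb, up(comb, row)) + row
--
--     def col_tree(array: List[int]) -> List[int]:
--         cl = npow2(len(array))
--         leaves = [array[i] if i < len(array) else 0 for i in range(cl)]
--         return levels(lambda a, b: a + b, leaves)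
--
--     rows = len(matrix)
--     length = npow2(rows)
--     leaves = [col_tree(matrix[i]) if i < rows else col_tree([0] * len(matrix[0]))
--               for i in range(length)]
--     return levels(lambda a, b: [x + y for x, y in zip(a, b)], leaves)
-- ===== Notes on version B (the rewrite author's own statement) =====
-- stated objective: alternative
-- what changed: Replaces A's while-doubling power search and its two imperative loops (leaf fill by index, then reversed bottom-up merge into a mutable array) with a closed-form next power of two via bit_length and a purely functional recursive builder that combines adjacent pairs level by level and concatenates the levels into the heap list.
import Mathlib
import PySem

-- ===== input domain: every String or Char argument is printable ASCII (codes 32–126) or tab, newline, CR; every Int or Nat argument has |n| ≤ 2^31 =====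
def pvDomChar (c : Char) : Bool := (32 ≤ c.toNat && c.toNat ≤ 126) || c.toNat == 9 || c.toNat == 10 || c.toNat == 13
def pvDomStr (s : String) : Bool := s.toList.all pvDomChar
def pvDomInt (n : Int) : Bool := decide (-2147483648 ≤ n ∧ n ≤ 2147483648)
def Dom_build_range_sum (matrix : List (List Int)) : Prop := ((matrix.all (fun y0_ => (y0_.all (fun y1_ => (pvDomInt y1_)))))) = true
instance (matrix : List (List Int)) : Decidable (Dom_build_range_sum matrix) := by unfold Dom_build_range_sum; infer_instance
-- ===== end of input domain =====

-- B replaces A's while-doubling power search and the two in-place loops (leaf fill, then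
-- reversed index merge into a mutable array) by a closed-form next power of two (bit_length
-- shift) and a recursive level-halving builder that concatenates the heap levels top-down
-- (objective: alternative decomposition).

-- ===== PORT A =====
-- while num > power: power *= 2   (0 < power is invariant, carried for termination)
def next_power_of_two_go (num power : Int) (h : 0 < power) : Int :=
  if num > power then next_power_of_two_go num (2 * power) (by omega) else power
termination_by (num - power).toNat
decreasing_by omega

def next_power_of_two (num : Int) : Int :=
  if num = 0 then 0 else next_power_of_two_go num 1 (by omega)

-- indices written/read by the loops are provably in range, so pySetD/pyGetD are exact here
def build_range_sum_col (array : List Int) : List Int :=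
  let length := next_power_of_two (array.length : Int)
  let result0 := (PySem.List.pyRange 0 (2*length-1) 1).map (fun _ => (0:Int))
  let result1 := (PySem.List.pyRange (length-1) (2*length-1) 1).foldl
    (fun r pos => PySem.List.pySetD r pos
      (if pos < length - 1 + (array.length : Int)
       then PySem.List.pyGetD array (pos - (length-1)) 0 else 0)) result0
  (PySem.List.pyRange 0 (length-1) 1).reverse.foldl
    (fun r pos => PySem.List.pySetD r pos
      (PySem.List.pyGetD r (2*pos+1) 0 + PySem.List.pyGetD r (2*pos+2) 0)) result1

def build_range_sum (matrix : List (List Int)) : List (List Int) :=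
  let length := next_power_of_two (matrix.length : Int)
  let result0 := (PySem.List.pyRange 0 (2*length-1) 1).map (fun _ => [(0:Int)])
  let result1 := (PySem.List.pyRange (length-1) (2*length-1) 1).foldl
    (fun r pos => PySem.List.pySetD r pos
      (if pos < length - 1 + (matrix.length : Int)
       then build_range_sum_col (PySem.List.pyGetD matrix (pos - (length-1)) [])
       else build_range_sum_col (List.replicate (PySem.List.pyGetD matrix 0 []).length 0))) result0
  (PySem.List.pyRange 0 (length-1) 1).reverse.foldl
    (fun r pos => PySem.List.pySetD r pos
      (((PySem.List.pyGetD r (2*pos+1) []).zip (PySem.List.pyGetD r (2*pos+2) [])).map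
        (fun q => q.1 + q.2))) result1

-- ===== PORT B =====
-- 0 if n == 0 else 1 << (n - 1).bit_length()
def pvNpow2 (n : Nat) : Nat := if n = 0 then 0 else 2 ^ Nat.size (n - 1)

-- one level up: combine adjacent pairs (the list index 2*i / 2*i+1 is provably in range; getD is exact)
def pvUp {α : Type} (d : α) (comb : α → α → α) (row : List α) : List α :=
  (List.range (row.length / 2)).map (fun i => comb (row.getD (2*i) d) (row.getD (2*i+1) d))

-- Source B's `levels`: the whole heap, upper levels first, built by halving
def pvLevels {α : Type} (d : α) (comb : α → α → α) (row : List α) : List α :=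
  if row.length ≤ 1 then row
  else pvLevels d comb (pvUp d comb row) ++ row
termination_by row.length
decreasing_by simp [pvUp]; omega

def pvColTree (array : List Int) : List Int :=
  let clen := pvNpow2 array.length
  pvLevels 0 (· + ·)
    ((List.range clen).map (fun i => if i < array.length then array.getD i 0 else 0))

def build_range_sum_alt (matrix : List (List Int)) : List (List Int) :=
  let rows := matrix.length
  let length := pvNpow2 rows
  pvLevels [] (fun a b => (a.zip b).map (fun q => q.1 + q.2))
    ((List.range length).map (fun i => if i < rows then pvColTree (matrix.getD i [])
                                       else pvColTree (List.replicate (matrix.getD 0 []).length 0)))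

-- ===== PRECONDITION & SPEC =====
def Spec_build_range_sum (matrix : List (List Int)) (out : List (List Int)) : Prop := out = build_range_sum_alt matrix
instance (matrix : List (List Int)) (out : List (List Int)) : Decidable (Spec_build_range_sum matrix out) := by unfold Spec_build_range_sum; infer_instance

-- ===== CLAIM (what is proved, stated in full; the proofs are below) =====
def Claim_equal_build_range_sum : Prop := ∀ (matrix : List (List Int)), Dom_build_range_sum matrix → Spec_build_range_sum matrix (build_range_sum matrix)

-- ===== LEMMAS AND PROOFS =====

-- A's while-doubling from 2^j reaches the least power of two ≥ num
theorem next_power_of_two_go_congr (num a b : Int) (h1 : 0 < a) (hab : a = b) :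
    next_power_of_two_go num a h1 = next_power_of_two_go num b (hab ▸ h1) := by
  subst hab; rfl

theorem next_power_of_two_go_pow (num : Int) (hn : 1 ≤ num) (j : Nat) :
    next_power_of_two_go num ((2^j : Nat) : Int) (by exact_mod_cast (Nat.one_le_two_pow : 1 ≤ 2^j)) =
      ((2 ^ (max j (Nat.size (num.toNat - 1))) : Nat) : Int) := by
  by_cases hc : num > ((2^j : Nat) : Int)
  · have h2 : 2^j ≤ num.toNat - 1 := by omega
    have hj : j < Nat.size (num.toNat - 1) := Nat.lt_size.mpr h2
    rw [next_power_of_two_go, if_pos hc]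
    have heq : (2 : Int) * ((2^j : Nat) : Int) = ((2^(j+1) : Nat) : Int) := by push_cast; ring
    rw [next_power_of_two_go_congr num _ _ _ heq, next_power_of_two_go_pow num hn (j+1),
        Nat.max_eq_right hj, Nat.max_eq_right (by omega)]
  · have h2 : num.toNat - 1 < 2^j := by omega
    have hj : Nat.size (num.toNat - 1) ≤ j := Nat.size_le.mpr h2
    rw [next_power_of_two_go, if_neg hc, Nat.max_eq_left hj]
termination_by Nat.size (num.toNat - 1) - j
decreasing_by
  have h2 : 2^j ≤ num.toNat - 1 := by omega
  have := Nat.lt_size.mpr h2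
  omega

-- A's helper agrees with B's closed-form next power of two
theorem next_power_of_two_natCast (n : Nat) :
    next_power_of_two (n : Int) = ((pvNpow2 n : Nat) : Int) := by
  unfold next_power_of_two pvNpow2
  by_cases h : n = 0
  · simp [h]
  · rw [if_neg (by omega), if_neg h]
    have h1 : ((1:Int)) = ((2^0 : Nat) : Int) := by norm_num
    rw [next_power_of_two_go_congr (n:Int) _ _ _ h1, next_power_of_two_go_pow (n : Int) (by omega)]
    simp only [Int.toNat_natCast]
    rw [Nat.max_eq_right (by omega)]

theorem npow2_pos (n : Nat) (h : 1 ≤ n) : 1 ≤ pvNpow2 n := by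
  unfold pvNpow2; rw [if_neg (by omega)]; exact Nat.one_le_two_pow

theorem le_npow2 (n : Nat) : n ≤ pvNpow2 n := by
  unfold pvNpow2
  by_cases h : n = 0
  · simp [h]
  · rw [if_neg h]
    exact Nat.le_of_pred_lt (Nat.lt_size_self (n-1))

-- helper names for the two loop bodies (proof-side only)
def pvFillStep {α : Type} (f : Int → α) (r : List α) (pos : Int) : List α :=
  PySem.List.pySetD r pos (f pos)

-- heap-node value, the common specification both programs are proved equal to
def pvNode {α : Type} (length : Nat) (leaf : Nat → α) (comb : α → α → α) (pos : Nat) : α :=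
  if length - 1 ≤ pos then leaf pos
  else comb (pvNode length leaf comb (2*pos+1)) (pvNode length leaf comb (2*pos+2))
termination_by length - 1 - pos
decreasing_by all_goals omega

def pvMergeStep {α : Type} (d : α) (comb : α → α → α) (r : List α) (pos : Int) : List α :=
  PySem.List.pySetD r pos (comb (PySem.List.pyGetD r (2*pos+1) d) (PySem.List.pyGetD r (2*pos+2) d))

-- leaf-filling loop: a fold of pySetD with a value depending only on the position
theorem fill_foldl {α : Type} (d : α) (f : Int → α) :
    ∀ (xs : List Int) (res : List α), (∀ p ∈ xs, 0 ≤ p ∧ p < (res.length : Int)) →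
      (xs.foldl (pvFillStep f) res).length = res.length ∧
      ∀ i : Nat, (xs.foldl (pvFillStep f) res).getD i d =
        if (i : Int) ∈ xs then f i else res.getD i d := by
  intro xs
  induction xs with
  | nil => intro res h; simp
  | cons p rest ih =>
    intro res h
    obtain ⟨hp0, hpl⟩ := h p (by simp)
    have hstep : pvFillStep f res p = res.set p.toNat (f p) := by
      rw [pvFillStep]; exact PySem.List.pySetD_of_nonneg res (f p) hp0
    have hlen : (pvFillStep f res p).length = res.length := by
      rw [hstep]; simp
    have hrec := ih (pvFillStep f res p) (by
      intro q hq
      obtain ⟨h1, h2⟩ := h q (by simp [hq])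
      exact ⟨h1, by omega⟩)
    rw [List.foldl_cons]
    refine ⟨by rw [hrec.1, hlen], ?_⟩
    intro i
    rw [hrec.2 i]
    by_cases hmem : (i : Int) ∈ rest
    · simp [hmem]
    · rw [if_neg hmem]
      by_cases hip : (i : Int) = p
      · have : i = p.toNat := by omega
        subst this
        rw [if_pos (by simp [hip]), hstep, hip]
        rw [List.getD_eq_getElem?_getD, List.getElem?_set_self (by omega)]
        simp
      · rw [if_neg (by simp [hmem, hip]), hstep]
        rw [List.getD_eq_getElem?_getD, List.getElem?_set_ne (by omega), ← List.getD_eq_getElem?_getD]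

-- reverse-merge loop: processing positions m-1, …, 0 finishes the heap
theorem merge_foldl {α : Type} (d : α) (L N : Nat) (hN : N = 2*L-1)
    (comb : α → α → α) (node : Nat → α)
    (hnode : ∀ p : Nat, p < L-1 → node p = comb (node (2*p+1)) (node (2*p+2))) :
    ∀ (m : Nat), m ≤ L-1 → ∀ (res : List α), res.length = N →
      (∀ i : Nat, m ≤ i → i < N → res.getD i d = node i) →
      (((PySem.List.pyRange 0 (m : Int) 1).reverse.foldl (pvMergeStep d comb) res).length = N ∧
       ∀ i : Nat, i < N →
        ((PySem.List.pyRange 0 (m : Int) 1).reverse.foldl (pvMergeStep d comb) res).getD i d = node i) := by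
  intro m
  induction m with
  | zero =>
    intro _ res hlen hinv
    rw [show ((0:Nat):Int) = 0 from rfl, PySem.List.pyRange_zero]
    exact ⟨hlen, fun i hi => hinv i (Nat.zero_le i) hi⟩
  | succ m ih =>
    intro hm res hlen hinv
    have hsplit : PySem.List.pyRange 0 ((m+1 : Nat) : Int) 1 = PySem.List.pyRange 0 (m : Int) 1 ++ [(m : Int)] := by
      push_cast
      exact PySem.List.pyRange_one_succ_right (by omega)
    rw [hsplit, List.reverse_append]
    simp only [List.reverse_singleton, List.singleton_append, List.foldl_cons]
    have hmL : m < L - 1 := by omega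
    have h2m2 : 2*m+2 < N := by omega
    have hget1 : PySem.List.pyGetD res (2*(m:Int)+1) d = node (2*m+1) := by
      have : (2*(m:Int)+1) = ((2*m+1 : Nat) : Int) := by push_cast; ring
      rw [this, PySem.List.pyGetD_natCast]
      exact hinv (2*m+1) (by omega) (by omega)
    have hget2 : PySem.List.pyGetD res (2*(m:Int)+2) d = node (2*m+2) := by
      have : (2*(m:Int)+2) = ((2*m+2 : Nat) : Int) := by push_cast; ring
      rw [this, PySem.List.pyGetD_natCast]
      exact hinv (2*m+2) (by omega) (by omega)
    have hstep : pvMergeStep d comb res (m : Int) = res.set m (node m) := by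
      rw [pvMergeStep, hget1, hget2, ← hnode m hmL,
          PySem.List.pySetD_of_nonneg res (node m) (by omega)]
      norm_num
    rw [hstep]
    exact ih (by omega) (res.set m (node m)) (by simp [hlen]) (by
      intro i him hiN
      by_cases he : i = m
      · subst he
        rw [List.getD_eq_getElem?_getD, List.getElem?_set_self (by omega)]
        rfl
      · rw [List.getD_eq_getElem?_getD, List.getElem?_set_ne (by omega),
            ← List.getD_eq_getElem?_getD]
        exact hinv i (by omega) hiN)

-- the whole A-shape (fill leaves over [L-1, 2L-2], then reverse-merge) equals B's map of pvNode
theorem build_shape_eq {α : Type} (d : α) (L : Nat) (hL : 1 ≤ L)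
    (leafA : Int → α) (comb : α → α → α) (leafB : Nat → α) (init : List α)
    (hinit : init.length = 2*L-1)
    (hleaf : ∀ p : Nat, L-1 ≤ p → p < 2*L-1 → leafA (p : Int) = leafB p) :
    (PySem.List.pyRange 0 ((L:Int)-1) 1).reverse.foldl (pvMergeStep d comb)
        ((PySem.List.pyRange ((L:Int)-1) (2*(L:Int)-1) 1).foldl (pvFillStep leafA) init)
      = (List.range (2*L-1)).map (pvNode L leafB comb) := by
  have hfill := fill_foldl d leafA (PySem.List.pyRange ((L:Int)-1) (2*(L:Int)-1) 1) init
    (by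
      intro p hp
      rw [PySem.List.mem_pyRange_one] at hp
      constructor
      · omega
      · rw [hinit]; omega)
  set res1 := (PySem.List.pyRange ((L:Int)-1) (2*(L:Int)-1) 1).foldl (pvFillStep leafA) init with hres1
  have hnodeB : ∀ p : Nat, p < L-1 → pvNode L leafB comb p =
      comb (pvNode L leafB comb (2*p+1)) (pvNode L leafB comb (2*p+2)) := by
    intro p hp
    rw [pvNode]
    rw [if_neg (by omega)]
  have hcast : ((L:Int)-1) = (((L-1 : Nat)) : Int) := by omega
  have hmerge := merge_foldl d L (2*L-1) rfl comb (pvNode L leafB comb) hnodeB (L-1) (le_refl _)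
    res1 (by rw [hfill.1, hinit])
    (by
      intro i hi hiN
      rw [hfill.2 i, if_pos (by rw [PySem.List.mem_pyRange_one]; omega)]
      rw [hleaf i hi hiN, pvNode, if_pos hi])
  rw [hcast]
  apply List.ext_getElem
  · rw [hmerge.1]; simp
  · intro i h1 h2
    have hiN : i < 2*L-1 := by simpa using h2
    rw [← List.getD_eq_getElem _ d h1, hmerge.2 i hiN]
    simp

-- halving a tree: a node of the 2M-tree below the root row is a node of the M-tree whose leaves combine adjacent leaf pairs
theorem pvNode_shrink {α : Type} (M : Nat) (hM : 1 ≤ M) (leafB : Nat → α) (comb : α → α → α) :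
    ∀ (n p : Nat), M - 1 - p ≤ n → p < 2*M - 1 →
      pvNode (2*M) leafB comb p =
      pvNode M (fun q => comb (leafB (2*q+1)) (leafB (2*q+2))) comb p := by
  intro n
  induction n with
  | zero =>
    intro p hn hp
    have hleaf : M - 1 ≤ p := by omega
    have c1 : pvNode (2*M) leafB comb (2*p+1) = leafB (2*p+1) := by
      rw [pvNode, if_pos (by omega)]
    have c2 : pvNode (2*M) leafB comb (2*p+2) = leafB (2*p+2) := by
      rw [pvNode, if_pos (by omega)]
    conv_rhs => rw [pvNode]
    rw [if_pos hleaf, pvNode, if_neg (by omega), c1, c2]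
  | succ n ih =>
    intro p hn hp
    by_cases hleaf : M - 1 ≤ p
    · have c1 : pvNode (2*M) leafB comb (2*p+1) = leafB (2*p+1) := by
        rw [pvNode, if_pos (by omega)]
      have c2 : pvNode (2*M) leafB comb (2*p+2) = leafB (2*p+2) := by
        rw [pvNode, if_pos (by omega)]
      conv_rhs => rw [pvNode]
      rw [if_pos hleaf, pvNode, if_neg (by omega), c1, c2]
    · conv_rhs => rw [pvNode]
      rw [if_neg hleaf, pvNode, if_neg (by omega),
          ih (2*p+1) (by omega) (by omega), ih (2*p+2) (by omega) (by omega)]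

theorem pvLevels_eq {α : Type} (d : α) (comb : α → α → α) :
    ∀ (k : Nat) (leafB : Nat → α),
      pvLevels d comb ((List.range (2^k)).map (fun t => leafB (2^k - 1 + t))) =
      (List.range (2*2^k - 1)).map (pvNode (2^k) leafB comb) := by
  intro k
  induction k with
  | zero =>
    intro leafB
    rw [pvLevels]
    simp [pvNode]
  | succ k ih =>
    intro leafB
    set M := 2^k with hM
    have hM1 : 1 ≤ M := Nat.one_le_two_pow
    have hL : 2^(k+1) = 2*M := by rw [hM, pow_succ]; ring
    rw [hL, pvLevels, if_neg (by simp; omega)]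
    have hup : pvUp d comb ((List.range (2*M)).map (fun t => leafB (2*M - 1 + t))) =
        (List.range M).map (fun t => (fun q => comb (leafB (2*q+1)) (leafB (2*q+2))) (M - 1 + t)) := by
      rw [pvUp]
      apply List.ext_getElem
      · simp
      · intro i h1 h2
        simp only [List.getElem_map, List.getElem_range] at *
        have hi : i < M := by simpa using h2
        rw [List.getD_eq_getElem _ _ (by simp; omega), List.getD_eq_getElem _ _ (by simp; omega)]
        simp only [List.getElem_map, List.getElem_range]
        congr 2 <;> omega
    rw [hup]
    beta_reduce
    rw [ih (fun q => comb (leafB (2*q+1)) (leafB (2*q+2)))]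
    have hsplit : 2*(2*M) - 1 = (2*M - 1) + 2*M := by omega
    rw [hsplit, List.range_add, List.map_append]
    congr 1
    · apply List.map_congr_left
      intro p hp
      rw [List.mem_range] at hp
      exact (pvNode_shrink M hM1 leafB comb (M - 1 - p) p (le_refl _) (by omega)).symm
    · rw [List.map_map]
      apply List.map_congr_left
      intro t _
      simp only [Function.comp_apply]
      rw [pvNode, if_pos (by omega)]

-- B's level-halving build of a pvNpow2-sized leaf row is the map of heap-node values
theorem alt_shape_eq {α : Type} (d : α) (comb : α → α → α) (n : Nat) (hn : 1 ≤ n) (big : Nat → α) :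
    pvLevels d comb ((List.range (pvNpow2 n)).map big) =
    (List.range (2*pvNpow2 n - 1)).map (pvNode (pvNpow2 n) (fun p => big (p - (pvNpow2 n - 1))) comb) := by
  have hpow : pvNpow2 n = 2 ^ Nat.size (n-1) := by unfold pvNpow2; rw [if_neg (by omega)]
  rw [hpow, ← pvLevels_eq d comb (Nat.size (n-1)) (fun p => big (p - (2^(Nat.size (n-1)) - 1)))]
  congr 1
  apply List.map_congr_left
  intro t ht
  rw [show 2^(Nat.size (n-1)) - 1 + t - (2^(Nat.size (n-1)) - 1) = t from by omega]

theorem build_range_sum_col_eq (array : List Int) :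
    build_range_sum_col array = pvColTree array := by
  by_cases h0 : array = []
  · subst h0
    simp [build_range_sum_col, pvColTree, pvNpow2, pvLevels, next_power_of_two,
          PySem.List.pyRange_one_eq_nil]
  · have hn : 1 ≤ array.length := List.length_pos_iff.mpr h0
    have hL : 1 ≤ pvNpow2 array.length := npow2_pos _ hn
    have hnL := le_npow2 array.length
    have hB : pvColTree array =
        (List.range (2*pvNpow2 array.length - 1)).map
          (pvNode (pvNpow2 array.length)
            (fun p => if p - (pvNpow2 array.length - 1) < array.length
                      then array.getD (p - (pvNpow2 array.length - 1)) 0 else 0) (· + ·)) := by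
      simp only [pvColTree]
      exact alt_shape_eq 0 (· + ·) array.length hn
        (fun i => if i < array.length then array.getD i 0 else 0)
    rw [hB]
    simp only [build_range_sum_col, next_power_of_two_natCast]
    exact build_shape_eq 0 (pvNpow2 array.length) hL _ _ _ _
      (by simp only [List.length_map, PySem.List.length_pyRange_one]; omega)
      (by
        intro p hp1 hp2
        have hcast : ((p:Int)) - (((pvNpow2 array.length : Nat) : Int) - 1) = ((p - (pvNpow2 array.length - 1) : Nat) : Int) := by omega
        rw [hcast, PySem.List.pyGetD_natCast]
        split_ifs <;> first | rfl | omega)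

-- ===== VERDICT (by name: the statement is the Claim_ definition above) =====
theorem build_range_sum_spec : Claim_equal_build_range_sum := by
  unfold Claim_equal_build_range_sum Spec_build_range_sum
  intro matrix _
  by_cases h0 : matrix = []
  · subst h0
    simp [build_range_sum, build_range_sum_alt, pvNpow2, pvLevels, next_power_of_two,
          PySem.List.pyRange_one_eq_nil]
  · have hn : 1 ≤ matrix.length := List.length_pos_iff.mpr h0
    have hL := npow2_pos _ hn
    have hnL := le_npow2 matrix.length
    have hB : build_range_sum_alt matrix =
        (List.range (2*pvNpow2 matrix.length - 1)).map
          (pvNode (pvNpow2 matrix.length)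
            (fun p => (fun i => if i < matrix.length then pvColTree (matrix.getD i [])
                                else pvColTree (List.replicate (matrix.getD 0 []).length 0))
                       (p - (pvNpow2 matrix.length - 1)))
            (fun a b => (a.zip b).map (fun q => q.1 + q.2))) := by
      simp only [build_range_sum_alt]
      exact alt_shape_eq [] (fun a b => (a.zip b).map (fun q => q.1 + q.2)) matrix.length hn
        (fun i => if i < matrix.length then pvColTree (matrix.getD i [])
                  else pvColTree (List.replicate (matrix.getD 0 []).length 0))
    rw [hB]
    simp only [build_range_sum, next_power_of_two_natCast]
    refine build_shape_eq (α := List Int) [] (pvNpow2 matrix.length) hL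
      (leafA := fun pos => if pos < ((pvNpow2 matrix.length : Nat) : Int) - 1 + (matrix.length : Int)
        then build_range_sum_col (PySem.List.pyGetD matrix (pos - (((pvNpow2 matrix.length : Nat) : Int) - 1)) [])
        else build_range_sum_col (List.replicate (PySem.List.pyGetD matrix 0 []).length 0))
      (comb := fun a b => (a.zip b).map (fun q => q.1 + q.2))
      (leafB := fun p => if p - (pvNpow2 matrix.length - 1) < matrix.length
        then pvColTree (matrix.getD (p - (pvNpow2 matrix.length - 1)) [])
        else pvColTree (List.replicate (matrix.getD 0 []).length 0))
      (init := (PySem.List.pyRange 0 (2*((pvNpow2 matrix.length : Nat) : Int)-1) 1).map (fun _ => [(0:Int)]))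
      ?_ ?_
    · simp only [List.length_map, PySem.List.length_pyRange_one]; omega
    · intro p hp1 hp2
      have hcast : ((p:Int)) - (((pvNpow2 matrix.length : Nat) : Int) - 1) = ((p - (pvNpow2 matrix.length - 1) : Nat) : Int) := by omega
      simp only [hcast, PySem.List.pyGetD_natCast, PySem.List.pyGetD_zero]
      split_ifs <;> first | omega | rw [build_range_sum_col_eq]
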